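-- pv_equiv track=rewrite | github.com/oblivi-ate/AI_project | ilp_flexible1.py | find_uncovered_combinations
-- ===== SOURCE A (Python) =====
-- from itertools import combinations
--
-- def find_uncovered_combinations(solution, n, k, j, s, min_cover):
--     """找出未被充分覆盖的j组合及其s子集"""
--     solution_sets = [set(group) for group in solution]
--     all_items = list(range(n))
--     j_combinations = list(combinations(all_items, j))
--     uncovered = []
--
--     for j_comb in j_combinations:
--         j_set = set(j_comb)
--         s_combinations = list(combinations(j_comb, s))
--         covered_s_combinations = set()
--
--         # 找出已被覆盖的s组合
--         for group in solution_sets: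
--             if len(group & j_set) >= s:
--                 for s_comb in s_combinations:
--                     if set(s_comb).issubset(group):
--                         covered_s_combinations.add(tuple(sorted(s_comb)))
--
--         # 如果覆盖不足，记录未覆盖的s组合
--         if len(covered_s_combinations) < min_cover:
--             uncovered_s = [s_comb for s_comb in s_combinations
--                          if tuple(sorted(s_comb)) not in covered_s_combinations]
--             uncovered.append((j_comb, uncovered_s))
--
--     return uncovered
-- ===== SOURCE B (Python) =====
-- from itertools import combinations
--
--
-- def find_uncovered_combinations(solution, n, k, j, s, min_cover):
--     """Covered s-subsets are generated directly from each group's intersection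
--     with the j-combination; the result is assembled by mapping a per-combination
--     classifier over all j-combinations and dropping the None entries."""
--     groups = [set(g) for g in solution]
--
--     def classify(j_comb):
--         covered = set(sc for g in groups
--                       for sc in combinations([x for x in j_comb if x in g], s))
--         if len(covered) < min_cover:
--             return (j_comb, [sc for sc in combinations(j_comb, s)
--                              if sc not in covered])
--         return None
--
--     return [e for e in map(classify, combinations(range(n), j)) if e is not None]
-- ===== Notes on version B (the rewrite author's own statement) =====
-- stated objective: alternative
-- what changed: B derives each group's covered s-subsets directly as the s-combinations of the group∩j_comb intersection (no overlap pre-check, no per-subset containment test, no re-sorting), and builds the result by mapping a per-j-combination classifier and filtering out None instead of accumulating with appends.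
import Mathlib
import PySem

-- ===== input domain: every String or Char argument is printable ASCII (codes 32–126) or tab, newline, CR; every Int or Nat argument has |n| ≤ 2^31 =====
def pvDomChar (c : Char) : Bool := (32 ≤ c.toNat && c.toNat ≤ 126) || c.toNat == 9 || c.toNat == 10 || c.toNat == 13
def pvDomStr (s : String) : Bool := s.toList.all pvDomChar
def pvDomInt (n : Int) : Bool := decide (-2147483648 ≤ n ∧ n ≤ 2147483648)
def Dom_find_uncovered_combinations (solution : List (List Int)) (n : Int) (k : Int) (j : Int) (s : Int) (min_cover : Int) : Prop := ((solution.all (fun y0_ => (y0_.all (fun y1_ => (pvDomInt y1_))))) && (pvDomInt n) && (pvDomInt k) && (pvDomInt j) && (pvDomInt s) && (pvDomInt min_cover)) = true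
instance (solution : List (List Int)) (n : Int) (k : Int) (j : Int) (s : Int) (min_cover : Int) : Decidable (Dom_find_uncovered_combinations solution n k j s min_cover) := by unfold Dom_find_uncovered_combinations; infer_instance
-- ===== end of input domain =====

-- B generates each group's covered s-subsets directly from the group∩j_comb intersection and assembles
-- the result by mapping a per-combination classifier and dropping the None entries (objective: alternative).

-- ===== PORT A =====
def find_uncovered_combinations (solution : List (List Int)) (n : Int) (k : Int) (j : Int) (s : Int) (min_cover : Int) : List (List Int × List (List Int)) :=
  let solution_sets := solution.map (fun group => PySem.Set.ofList group)
  let all_items := PySem.List.pyRange 0 n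
  let j_combinations := PySem.List.combinations all_items j.toNat
  j_combinations.foldl (fun uncovered j_comb =>
    let j_set : PySem.Set Int := PySem.Set.ofList j_comb
    let s_combinations := PySem.List.combinations j_comb s.toNat
    let covered : PySem.Set (List Int) := solution_sets.foldl (fun cov group =>
      if s ≤ PySem.Set.len (PySem.Set.inter group j_set) then
        s_combinations.foldl (fun cov s_comb =>
          if PySem.Set.issubset (PySem.Set.ofList s_comb) group then
            PySem.Set.add cov (PySem.List.sorted s_comb (fun x => x))
          else cov) cov
      else cov) PySem.Set.empty
    if PySem.Set.len covered < min_cover then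
      uncovered ++ [(j_comb, s_combinations.filter
        (fun s_comb => !(PySem.Set.contains covered (PySem.List.sorted s_comb (fun x => x)))))]
    else uncovered) []

-- ===== PORT B =====
-- classify(j_comb): the covered set is set(...) of the flat list of s-combinations of each intersection
def fucClassify (groups : List (PySem.Set Int)) (s : Int) (min_cover : Int)
    (j_comb : List Int) : Option (List Int × List (List Int)) :=
  let covered : PySem.Set (List Int) :=
    PySem.Set.ofList (groups.flatMap (fun g =>
      PySem.List.combinations (j_comb.filter (fun x => PySem.Set.contains g x)) s.toNat))
  if PySem.Set.len covered < min_cover then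
    some (j_comb, (PySem.List.combinations j_comb s.toNat).filter
      (fun sc => !(PySem.Set.contains covered sc)))
  else none

def find_uncovered_combinations_alt (solution : List (List Int)) (n : Int) (k : Int) (j : Int) (s : Int) (min_cover : Int) : List (List Int × List (List Int)) :=
  ((PySem.List.combinations (PySem.List.pyRange 0 n) j.toNat).map
    (fucClassify (solution.map (fun g => PySem.Set.ofList g)) s min_cover)).filterMap id

-- ===== PRECONDITION & SPEC =====
-- Python's combinations(..., r) raises ValueError for negative r, so A raises iff j < 0, or s < 0 and
-- there is at least one j-combination (for 0 < j ∧ n < j there are none, so combinations(j_comb, s) is never reached).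
def Pre_find_uncovered_combinations (solution : List (List Int)) (n : Int) (k : Int) (j : Int) (s : Int) (min_cover : Int) : Prop := 0 ≤ j ∧ (0 ≤ s ∨ (0 < j ∧ n < j))
instance (solution : List (List Int)) (n : Int) (k : Int) (j : Int) (s : Int) (min_cover : Int) : Decidable (Pre_find_uncovered_combinations solution n k j s min_cover) := by unfold Pre_find_uncovered_combinations; infer_instance
def pvWitness_find_uncovered_combinations : List (List Int) × Int × Int × Int × Int × Int := ([[0, 1], [1, 2]], 3, 2, 2, 2, 1)
def Spec_find_uncovered_combinations (solution : List (List Int)) (n : Int) (k : Int) (j : Int) (s : Int) (min_cover : Int) (out : List (List Int × List (List Int))) : Prop := out = find_uncovered_combinations_alt solution n k j s min_cover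
instance (solution : List (List Int)) (n : Int) (k : Int) (j : Int) (s : Int) (min_cover : Int) (out : List (List Int × List (List Int))) : Decidable (Spec_find_uncovered_combinations solution n k j s min_cover out) := by unfold Spec_find_uncovered_combinations; infer_instance

-- ===== CLAIM (what is proved, stated in full; the proofs are below) =====
def Claim_equal_find_uncovered_combinations : Prop := ∀ (solution : List (List Int)) (n : Int) (k : Int) (j : Int) (s : Int) (min_cover : Int), Dom_find_uncovered_combinations solution n k j s min_cover → Pre_find_uncovered_combinations solution n k j s min_cover → Spec_find_uncovered_combinations solution n k j s min_cover (find_uncovered_combinations solution n k j s min_cover)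

-- ===== LEMMAS AND PROOFS =====

-- combinations of a filtered list = the combinations whose members all satisfy the filter, in the same order
lemma combinations_filter (p : Int → Bool) (xs : List Int) (r : Nat) :
    PySem.List.combinations (xs.filter p) r = (PySem.List.combinations xs r).filter (fun c => c.all p) := by
  induction xs generalizing r with
  | nil =>
      cases r with
      | zero => simp [PySem.List.combinations_zero]
      | succ r => simp [PySem.List.combinations_nil_succ]
  | cons x xs ih =>
      cases r with
      | zero => simp [PySem.List.combinations_zero]
      | succ r =>
          by_cases hx : p x = true
          · simp [hx, PySem.List.combinations_cons_succ, ih,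
              List.filter_append, List.filter_map, Function.comp_def]
          · simp only [Bool.not_eq_true] at hx
            simp [hx, PySem.List.combinations_cons_succ, ih,
              List.filter_append, List.filter_map, Function.comp_def]

lemma pyRange_pairwise_aux (m : Nat) : ∀ (a b : Int), (b - a).toNat = m → (PySem.List.pyRange a b).Pairwise (· < ·) := by
  induction m with
  | zero =>
      intro a b h
      have : PySem.List.pyRange a b = [] := by
        apply List.eq_nil_iff_forall_not_mem.mpr
        intro x hx
        have := PySem.List.mem_pyRange_one.mp hx
        omega
      simp [this]
  | succ m ih =>
      intro a b h
      have hab : a < b := by omega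
      rw [PySem.List.pyRange_one_cons hab]
      refine List.Pairwise.cons ?_ (ih (a + 1) b (by omega))
      intro x hx
      have := PySem.List.mem_pyRange_one.mp hx
      omega

lemma pyRange_pairwise (a b : Int) : (PySem.List.pyRange a b).Pairwise (· < ·) :=
  pyRange_pairwise_aux (b - a).toNat a b rfl

lemma mem_combinations_pairwise {xs c : List Int} {r : Nat} (h : c ∈ PySem.List.combinations xs r)
    (hxs : xs.Pairwise (· < ·)) : c.Pairwise (· < ·) :=
  hxs.sublist ((PySem.List.mem_combinations_iff xs r c).mp h).1

lemma sorted_id_of_pairwise {c : List Int} (h : c.Pairwise (· < ·)) :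
    PySem.List.sorted c (fun x => x) = c :=
  PySem.List.sorted_eq_of_perm_of_pairwise_lt c c (fun x => x) (List.Perm.refl c) h

lemma issubset_ofList_eq_all (sc : List Int) (g : List Int) :
    PySem.Set.issubset (PySem.Set.ofList sc) (PySem.Set.ofList g)
      = sc.all (fun x => PySem.Set.contains (PySem.Set.ofList g) x) := by
  rw [Bool.eq_iff_iff, PySem.Set.issubset_iff, List.all_eq_true]
  simp [PySem.Set.mem_ofList, PySem.Set.contains]

-- |group ∩ j_set| = |[x for x in j_comb if x in group]| (both are nodup lists of the same finite set)
lemma inter_length_eq (g : List Int) (j_comb : List Int) (hj : j_comb.Nodup) :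
    (PySem.Set.inter (PySem.Set.ofList g) (PySem.Set.ofList j_comb)).length
      = (j_comb.filter (fun x => PySem.Set.contains (PySem.Set.ofList g) x)).length := by
  apply List.Perm.length_eq
  simp only [PySem.Set.inter]
  rw [List.perm_ext_iff_of_nodup ((PySem.Set.nodup_ofList g).filter _) (hj.filter _)]
  intro x
  simp [PySem.Set.contains, PySem.Set.mem_ofList, List.mem_filter, and_comm]

-- one group's contribution to A's covered set = adding all s-combinations of the intersection
lemma group_step_eq (j_comb : List Int) (hjp : j_comb.Pairwise (· < ·)) (g : List Int)
    (s : Int) (hs : 0 ≤ s) (cov : PySem.Set (List Int)) :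
    (if s ≤ PySem.Set.len (PySem.Set.inter (PySem.Set.ofList g) (PySem.Set.ofList j_comb)) then
      (PySem.List.combinations j_comb s.toNat).foldl (fun cov s_comb =>
        if PySem.Set.issubset (PySem.Set.ofList s_comb) (PySem.Set.ofList g) then
          PySem.Set.add cov (PySem.List.sorted s_comb (fun x => x))
        else cov) cov
    else cov)
    = (PySem.List.combinations (j_comb.filter (fun x => PySem.Set.contains (PySem.Set.ofList g) x)) s.toNat).foldl
        (fun cov s_comb => PySem.Set.add cov s_comb) cov := by
  by_cases hlen : s ≤ PySem.Set.len (PySem.Set.inter (PySem.Set.ofList g) (PySem.Set.ofList j_comb))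
  · rw [if_pos hlen, combinations_filter, List.foldl_filter]
    apply PySem.List.foldl_congr_mem
    intro acc sc hsc
    rw [issubset_ofList_eq_all, sorted_id_of_pairwise (mem_combinations_pairwise hsc hjp)]
  · rw [if_neg hlen]
    have hnodup : j_comb.Nodup := hjp.imp (fun h => ne_of_lt h)
    have hlt : (j_comb.filter (fun x => PySem.Set.contains (PySem.Set.ofList g) x)).length < s.toNat := by
      rw [← inter_length_eq g j_comb hnodup]
      simp only [PySem.Set.len] at hlen
      omega
    rw [PySem.List.combinations_eq_nil_of_length_lt _ hlt]
    rfl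

-- folding Set.add over a flat list = the nested fold over its pieces
lemma foldl_add_flatMap {α β : Type} [BEq β] (l : List α) (f : α → List β) (init : PySem.Set β) :
    (l.flatMap f).foldl (fun cov x => PySem.Set.add cov x) init
      = l.foldl (fun cov a => (f a).foldl (fun cov x => PySem.Set.add cov x) cov) init := by
  induction l generalizing init with
  | nil => rfl
  | cons a l ih => simp only [List.flatMap_cons, List.foldl_append, List.foldl_cons, ih]

-- folding 'if f x is not None: out.append(f x)' = filterMap over the mapped list
lemma foldl_option_append {α β : Type} (l : List α) (f : α → Option β) (acc : List β) :
    l.foldl (fun acc x => match f x with | some e => acc ++ [e] | none => acc) acc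
      = acc ++ (l.map f).filterMap id := by
  induction l generalizing acc with
  | nil => simp
  | cons a l ih =>
      cases h : f a <;> simp [ih, h]

-- A's covered set for a fixed j_comb equals B's covered set
lemma covered_eq (solution : List (List Int)) (j_comb : List Int) (hjp : j_comb.Pairwise (· < ·))
    (s : Int) (hs : 0 ≤ s) :
    (solution.map (fun group => PySem.Set.ofList group)).foldl (fun cov group =>
      if s ≤ PySem.Set.len (PySem.Set.inter group (PySem.Set.ofList j_comb)) then
        (PySem.List.combinations j_comb s.toNat).foldl (fun cov s_comb =>
          if PySem.Set.issubset (PySem.Set.ofList s_comb) group then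
            PySem.Set.add cov (PySem.List.sorted s_comb (fun x => x))
          else cov) cov
      else cov) PySem.Set.empty
    = PySem.Set.ofList ((solution.map (fun group => PySem.Set.ofList group)).flatMap (fun g =>
        PySem.List.combinations (j_comb.filter (fun x => PySem.Set.contains g x)) s.toNat)) := by
  conv_rhs => rw [PySem.Set.ofList_eq_foldl, foldl_add_flatMap]
  apply PySem.List.foldl_congr_mem
  intro cov grp hg
  rcases List.mem_map.mp hg with ⟨g, _, rfl⟩
  exact group_step_eq j_comb hjp g s hs cov

-- ===== VERDICT (by name: the statement is the Claim_ definition above) =====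
theorem find_uncovered_combinations_spec : Claim_equal_find_uncovered_combinations := by
  intro solution n k j s min_cover _ hpre
  obtain ⟨hj, hs | hempty⟩ := hpre
  case inr =>
    have hnil : PySem.List.combinations (PySem.List.pyRange 0 n) j.toNat = [] := by
      apply PySem.List.combinations_eq_nil_of_length_lt
      rw [PySem.List.length_pyRange_one]
      omega
    unfold Spec_find_uncovered_combinations find_uncovered_combinations find_uncovered_combinations_alt
    simp only [hnil, List.foldl_nil, List.map_nil, List.filterMap_nil]
  unfold Spec_find_uncovered_combinations find_uncovered_combinations find_uncovered_combinations_alt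
  simp only
  have hmain := foldl_option_append (PySem.List.combinations (PySem.List.pyRange 0 n) j.toNat)
    (fucClassify (solution.map (fun group => PySem.Set.ofList group)) s min_cover) []
  rw [List.nil_append] at hmain
  rw [← hmain]
  apply PySem.List.foldl_congr_mem
  intro unc j_comb hjmem
  have hjp : j_comb.Pairwise (· < ·) := mem_combinations_pairwise hjmem (pyRange_pairwise 0 n)
  rw [covered_eq solution j_comb hjp s hs]
  unfold fucClassify
  simp only
  set covB := PySem.Set.ofList ((solution.map (fun group => PySem.Set.ofList group)).flatMap (fun g =>
      PySem.List.combinations (j_comb.filter (fun x => PySem.Set.contains g x)) s.toNat)) with hcovB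
  by_cases hlt : PySem.Set.len covB < min_cover
  · rw [if_pos hlt, if_pos hlt]
    have hfilt : (PySem.List.combinations j_comb s.toNat).filter
        (fun s_comb => !(PySem.Set.contains covB (PySem.List.sorted s_comb (fun x => x))))
        = (PySem.List.combinations j_comb s.toNat).filter (fun sc => !(PySem.Set.contains covB sc)) := by
      apply List.filter_congr
      intro sc hsc
      rw [sorted_id_of_pairwise (mem_combinations_pairwise hsc hjp)]
    rw [hfilt]
  · rw [if_neg hlt, if_neg hlt]
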